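-- pv_equiv track=rewrite | github.com/pimang62/this-is-coding-test | chapter11/6-2_pimang62.py | solution
-- ===== SOURCE A (Python) =====
-- import heapq
--
-- def solution(food_times, k):
--
--     if sum(food_times) <= k:
--         return -1
--
--     q = []
--     for idx, time in enumerate(food_times):
--         heapq.heappush(q, (time, idx+1))
--
--     k_total = 0
--     once = 0  # 직전에 다 먹은 시간 : 첫 번째 음식을 다 먹은 만큼 횟수만큼 차감해야 하기 때문 !
--     length = len(food_times)
--     while k_total <= k :
--
--         k_prime = (q[0][0] - once) * length
--
--         if k_total + k_prime > k :
--             break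
--
--         once = heapq.heappop(q)[0]
--         k_total += k_prime
--         length -= 1
--
--     # 인덱스 찾기
--     i = (k - k_total) % length
--     # 번호 순 정렬
--     q = sorted(q, key = lambda x : x[1])
--     return q[i][1]
-- ===== SOURCE B (Python) =====
-- def solution(food_times, k):
--     if sum(food_times) <= k:
--         return -1
--
--     def spent_at(x):
--         # total seconds consumed once every food has been eaten for at most x seconds
--         return sum(min(t, x) for t in food_times)
--
--     # largest eating time fully finished within k seconds (threshold), if any
--     best = None
--     for t in food_times:
--         if spent_at(t) <= k and (best is None or t > best):
--             best = t
--
--     if best is None: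
--         spent = 0
--         survivors = list(range(1, len(food_times) + 1))
--     else:
--         spent = spent_at(best)
--         survivors = [i + 1 for i, t in enumerate(food_times) if t > best]
--     return survivors[(k - spent) % len(survivors)]
-- ===== Notes on version B (the rewrite author's own statement) =====
-- stated objective: alternative
-- what changed: Replaces A's heap-driven round-by-round eating simulation with a threshold characterization: B scans for the largest eating time b whose total consumption sum(min(t,b)) fits in k (no heap, no sort, no incremental loop state) and reads the answer off the survivors t > b directly.
-- outside the precondition, e.g. on solution([-3, -2], -6): A returns 1, B returns 2; on solution([], -1): A raises ZeroDivisionError, B raises ZeroDivisionError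
import Mathlib
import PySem

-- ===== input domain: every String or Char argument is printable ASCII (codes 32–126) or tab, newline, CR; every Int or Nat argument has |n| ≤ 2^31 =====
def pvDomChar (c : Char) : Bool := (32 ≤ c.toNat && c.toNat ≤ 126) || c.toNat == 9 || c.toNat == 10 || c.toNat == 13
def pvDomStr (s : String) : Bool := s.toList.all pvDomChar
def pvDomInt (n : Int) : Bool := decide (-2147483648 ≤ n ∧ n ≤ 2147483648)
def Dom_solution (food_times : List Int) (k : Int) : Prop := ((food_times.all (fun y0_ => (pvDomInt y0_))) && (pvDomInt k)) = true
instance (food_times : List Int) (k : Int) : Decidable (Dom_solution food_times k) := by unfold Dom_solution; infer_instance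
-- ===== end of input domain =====

-- B replaces A's heap-driven eating simulation by a threshold scan (the largest fully
-- finished eating time b with sum(min(t,b)) <= k); alternative algorithm, same answers.

-- ===== PORT A =====
-- Python tuple comparison (time, idx) is lexicographic; heapq pops elements in
-- ascending tuple order, so the priority queue is modelled exactly as an ordered
-- list (heappush = ordered insert, heappop = take the head).
def heapLex (a b : Int × Int) : Bool :=
  decide (a.1 < b.1) || (!decide (b.1 < a.1) && decide (a.2 < b.2))

-- the 'while k_total <= k' loop; state (k_total, once, length, q), returns (q, k_total, length)
def solLoopA (k : Int) : Int → Int → Int → List (Int × Int) → List (Int × Int) × Int × Int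
  | kt, _, len, [] => ([], kt, len)
      -- Python evaluates q[0] here when kt ≤ k and raises IndexError; under the
      -- sum > k guard this state is unreachable (the loop never empties the heap)
  | kt, once, len, (t, i) :: rest =>
    if kt ≤ k then
      let kp := (t - once) * len
      if kt + kp > k then ((t, i) :: rest, kt, len)
      else solLoopA k (kt + kp) t (len - 1) rest
    else ((t, i) :: rest, kt, len)

def solution (food_times : List Int) (k : Int) : Int :=
  if food_times.sum ≤ k then -1
  else
    let q := (PySem.List.enumerate food_times).foldl
      (fun q p => PySem.List.insertBy heapLex (p.2, p.1 + 1) q) []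
    let s := solLoopA k 0 0 (food_times.length : Int) q
    let i := PySem.Int.mod (k - s.2.1) s.2.2
    let qs := PySem.List.sorted s.1 (fun x => x.2)
    -- q[i][1]: in range whenever the Python returns (Pre_); default never used
    (PySem.List.pyGetD qs i (0, 0)).2

-- ===== PORT B =====
-- spent_at(x): total seconds consumed once every food has been eaten for at most x seconds
def spentAt (food_times : List Int) (x : Int) : Int :=
  (food_times.map (fun t => min t x)).sum

-- body of 'for t in food_times: if spent_at(t) <= k and (best is None or t > best): best = t'
def bestStep (food_times : List Int) (k : Int) (b : Option Int) (t : Int) : Option Int :=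
  match b with
  | none => if spentAt food_times t ≤ k then some t else none
  | some bb => if spentAt food_times t ≤ k ∧ bb < t then some t else some bb

def solution_alt (food_times : List Int) (k : Int) : Int :=
  if food_times.sum ≤ k then -1
  else
    match food_times.foldl (bestStep food_times k) none with
    | none =>
      let survivors := PySem.List.pyRange 1 ((food_times.length : Int) + 1) 1
      PySem.List.pyGetD survivors (PySem.Int.mod (k - 0) (survivors.length : Int)) 0
    | some b =>
      let spent := spentAt food_times b
      let survivors := (PySem.List.enumerate food_times).filterMap
        (fun p => if b < p.2 then some (p.1 + 1) else none)
      PySem.List.pyGetD survivors (PySem.Int.mod (k - spent) (survivors.length : Int)) 0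

-- ===== PRECONDITION & SPEC =====
-- Pre_ excludes only nonsensical inputs with a negative elapsed time k where either the list is
-- empty (A raises ZeroDivisionError) or some (necessarily negative) eating time t has
-- len(food_times)*t ≤ k: there A never enters its loop and its wrap-around answer is an accident
-- of Python's negative modulo over leftover heap state.
def Pre_solution (food_times : List Int) (k : Int) : Prop :=
  0 ≤ k ∨ (food_times ≠ [] ∧ ∀ t ∈ food_times, k < (food_times.length : Int) * t)
instance (food_times : List Int) (k : Int) : Decidable (Pre_solution food_times k) := by
  unfold Pre_solution; infer_instance
def pvWitness_solution : List Int × Int := ([3, 1, 2], 5)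

def Spec_solution (food_times : List Int) (k : Int) (out : Int) : Prop := out = solution_alt food_times k
instance (food_times : List Int) (k : Int) (out : Int) : Decidable (Spec_solution food_times k out) := by unfold Spec_solution; infer_instance

-- ===== CLAIM (what is proved, stated in full; the proofs are below) =====
def Claim_equal_solution : Prop := ∀ (food_times : List Int) (k : Int), Dom_solution food_times k → Pre_solution food_times k → Spec_solution food_times k (solution food_times k)

-- ===== LEMMAS AND PROOFS =====

-- proof-side abbreviations
def mappedOf (ft : List Int) : List (Int × Int) :=
  (PySem.List.enumerate ft).map (fun p => (p.2, p.1 + 1))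

def heapOf (ft : List Int) : List (Int × Int) :=
  (PySem.List.enumerate ft).foldl (fun q p => PySem.List.insertBy heapLex (p.2, p.1 + 1) q) []

def Pd (ft : List Int) (k : Int) (x : Int × Int) : Bool := decide (spentAt ft x.1 ≤ k)

def sumF (l : List (Int × Int)) : Int := (l.map Prod.fst).sum

def lastT (w : List (Int × Int)) (once : Int) : Int :=
  match w.getLast? with | none => once | some x => x.1

theorem heap_perm (ft : List Int) : (heapOf ft).Perm (mappedOf ft) := by
  have h := PySem.List.foldl_insertBy_perm heapLex
    ((PySem.List.enumerate ft).map (fun p => (p.2, p.1 + 1))) []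
  rw [List.foldl_map] at h
  simpa [heapOf, mappedOf] using h

theorem insertBy_pairwise_fst (x : Int × Int) :
    ∀ ys : List (Int × Int), ys.Pairwise (fun a b : Int × Int => a.1 ≤ b.1) →
      (PySem.List.insertBy heapLex x ys).Pairwise (fun a b : Int × Int => a.1 ≤ b.1) := by
  intro ys
  induction ys with
  | nil => intro _; simp [PySem.List.insertBy]
  | cons y ys ih =>
    intro h
    rcases List.pairwise_cons.mp h with ⟨hy, hys⟩
    by_cases hb : heapLex x y = true
    · have hxy : x.1 ≤ y.1 := by
        simp only [heapLex, Bool.or_eq_true, Bool.and_eq_true, Bool.not_eq_true',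
          decide_eq_true_eq, decide_eq_false_iff_not] at hb
        rcases hb with h1 | ⟨h1, _⟩
        · exact le_of_lt h1
        · omega
      simp only [PySem.List.insertBy, hb, if_true]
      refine List.pairwise_cons.mpr ⟨?_, h⟩
      intro z hz
      rcases List.mem_cons.mp hz with rfl | hz
      · exact hxy
      · exact le_trans hxy (hy z hz)
    · have hyx : y.1 ≤ x.1 := by
        simp only [heapLex, Bool.or_eq_true, Bool.and_eq_true, Bool.not_eq_true',
          decide_eq_true_eq, decide_eq_false_iff_not] at hb
        omega
      simp only [PySem.List.insertBy, hb]
      refine List.pairwise_cons.mpr ⟨?_, ih hys⟩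
      intro z hz
      rw [PySem.List.mem_insertBy] at hz
      rcases hz with rfl | hz
      · exact hyx
      · exact hy z hz

theorem heap_pairwise (ft : List Int) :
    (heapOf ft).Pairwise (fun a b : Int × Int => a.1 ≤ b.1) := by
  unfold heapOf
  have : ∀ (l : List (Int × Int)) (acc : List (Int × Int)),
      acc.Pairwise (fun a b : Int × Int => a.1 ≤ b.1) →
      (l.foldl (fun q p => PySem.List.insertBy heapLex p q) acc).Pairwise
        (fun a b : Int × Int => a.1 ≤ b.1) := by
    intro l
    induction l with
    | nil => intro acc h; simpa using h
    | cons p l ih => intro acc h; exact ih _ (insertBy_pairwise_fst p acc h)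
  have h2 := this ((PySem.List.enumerate ft).map (fun p => (p.2, p.1 + 1))) [] (by simp)
  rw [List.foldl_map] at h2
  exact h2

theorem spent_mono (ft : List Int) {a b : Int} (h : a ≤ b) : spentAt ft a ≤ spentAt ft b := by
  unfold spentAt
  exact List.sum_le_sum (fun t _ => min_le_min le_rfl h)

theorem spent_parts (ft : List Int) (c : Int) (u v : List (Int × Int))
    (hperm : ((u ++ v).map Prod.fst).Perm ft)
    (hu : ∀ x ∈ u, x.1 ≤ c) (hv : ∀ x ∈ v, c ≤ x.1) :
    spentAt ft c = sumF u + c * v.length := by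
  unfold spentAt sumF
  rw [← (hperm.map (fun t => min t c)).sum_eq]
  rw [List.map_append, List.map_append, List.sum_append, List.map_map, List.map_map]
  congr 1
  · rw [List.map_congr_left (fun x hx => by
      simp only [Function.comp_apply]; exact min_eq_left (hu x hx))]
  · rw [List.map_congr_left (fun x hx => by
      simp only [Function.comp_apply]; exact min_eq_right (hv x hx))]
    simp [mul_comm]

theorem lastT_cons (x : Int × Int) (w : List (Int × Int)) (once : Int) :
    lastT (x :: w) once = lastT w x.1 := by
  cases w with
  | nil => simp [lastT]
  | cons y ys =>
    simp only [lastT, List.getLast?_cons_cons]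
    rcases hl : (y :: ys).getLast? with _ | z
    · simp at hl
    · rfl

theorem loopA_char (ft : List Int) (k : Int) (arr : List (Int × Int))
    (hpw : arr.Pairwise (fun a b : Int × Int => a.1 ≤ b.1))
    (hf : (arr.map Prod.fst).Perm ft) :
    ∀ (q p : List (Int × Int)) (kt once : Int),
      arr = p ++ q → kt = sumF p + once * q.length → kt ≤ k →
      solLoopA k kt once (q.length : Int) q =
        (q.dropWhile (Pd ft k),
         sumF p + sumF (q.takeWhile (Pd ft k)) +
           lastT (q.takeWhile (Pd ft k)) once * ((q.length : Int) - (q.takeWhile (Pd ft k)).length),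
         (q.length : Int) - (q.takeWhile (Pd ft k)).length) := by
  intro q
  induction q with
  | nil =>
    intro p kt once harr hkt hle
    simp [solLoopA, lastT, hkt, sumF]
  | cons hd rest ih =>
    intro p kt once harr hkt hle
    obtain ⟨t, i⟩ := hd
    -- the bounds from sortedness
    have hsplit := List.pairwise_append.mp (harr ▸ hpw)
    obtain ⟨hp, hq, hcross⟩ := hsplit
    have hu : ∀ x ∈ p, x.1 ≤ t := fun x hx => hcross x hx (t, i) List.mem_cons_self
    have hv : ∀ x ∈ (t, i) :: rest, t ≤ x.1 := by
      intro x hx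
      rcases List.mem_cons.mp hx with rfl | hx
      · exact le_rfl
      · exact (List.pairwise_cons.mp hq).1 x hx
    have hsp : spentAt ft t = sumF p + t * (((t, i) :: rest).length : Int) := by
      have := spent_parts ft t p ((t, i) :: rest) (by rw [← harr]; exact hf) hu hv
      exact_mod_cast this
    have hkey : kt + (t - once) * (((t, i) :: rest).length : Int) = spentAt ft t := by
      rw [hsp, hkt]; ring
    by_cases hP : spentAt ft t ≤ k
    · -- pop
      have hnb : ¬ (kt + (t - once) * (((t, i) :: rest).length : Int) > k) := by omega
      have hlen1 : (((t, i) :: rest).length : Int) - 1 = (rest.length : Int) := by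
        push_cast [List.length_cons]; ring
      have hrec := ih (p ++ [(t, i)]) (kt + (t - once) * (((t, i) :: rest).length : Int)) t
        (by rw [harr, List.append_assoc]; rfl)
        (by rw [hkey, hsp]; simp [sumF]; ring)
        (by omega)
      simp only [solLoopA, if_pos hle, if_neg hnb]
      rw [hlen1, hrec]
      have hPd : Pd ft k (t, i) = true := by simp [Pd, hP]
      simp only [List.takeWhile_cons, List.dropWhile_cons, hPd, if_true, lastT_cons]
      rw [Prod.mk.injEq, Prod.mk.injEq]
      refine ⟨rfl, ?_, ?_⟩
      · simp only [sumF, List.map_append, List.sum_append, List.map_cons, List.sum_cons,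
          List.map_nil, List.sum_nil, List.length_cons]
        push_cast
        ring
      · push_cast [List.length_cons]; ring
    · -- break
      have hb : kt + (t - once) * (((t, i) :: rest).length : Int) > k := by omega
      have hPd : Pd ft k (t, i) = false := by simp [Pd, hP]
      simp only [solLoopA, if_pos hle, if_pos hb, List.takeWhile_cons, List.dropWhile_cons, hPd]
      simp [sumF, lastT, hkt]

theorem tw_filter (ft : List Int) (k : Int) :
    ∀ l : List (Int × Int), l.Pairwise (fun a b : Int × Int => a.1 ≤ b.1) →
      l.takeWhile (Pd ft k) = l.filter (Pd ft k) ∧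
      l.dropWhile (Pd ft k) = l.filter (fun x => !(Pd ft k x)) := by
  intro l
  induction l with
  | nil => intro _; simp
  | cons x xs ih =>
    intro h
    rcases List.pairwise_cons.mp h with ⟨hx, hxs⟩
    rcases ih hxs with ⟨ht, hd⟩
    by_cases hp : Pd ft k x = true
    · simp [hp, ht, hd]
    · have hall : ∀ y ∈ xs, Pd ft k y = false := by
        intro y hy
        have hp' : ¬ spentAt ft x.1 ≤ k := by simpa [Pd] using hp
        simp only [Pd, decide_eq_false_iff_not]
        intro hky
        exact hp' (le_trans (spent_mono ft (hx y hy)) hky)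
      have hfilter : xs.filter (Pd ft k) = [] := by
        rw [List.filter_eq_nil_iff]
        intro y hy
        simp [hall y hy]
      have hfilter2 : xs.filter (fun x => !(Pd ft k x)) = xs := by
        rw [List.filter_eq_self]
        intro y hy
        simp [hall y hy]
      simp [hp, hfilter, hfilter2]

theorem bestFold_char (ft : List Int) (k : Int) :
    ∀ (l : List Int) (b : Option Int),
      match l.foldl (bestStep ft k) b with
      | none => b = none ∧ ∀ t ∈ l, ¬ (spentAt ft t ≤ k)
      | some m => (b = some m ∨ (m ∈ l ∧ spentAt ft m ≤ k)) ∧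
          (∀ t ∈ l, spentAt ft t ≤ k → t ≤ m) ∧ (∀ bb, b = some bb → bb ≤ m) := by
  intro l
  induction l with
  | nil =>
    intro b
    cases b with
    | none => simp
    | some m => simp
  | cons x xs ih =>
    intro b
    have hstep := ih (bestStep ft k b x)
    rw [List.foldl_cons]
    cases hres : (xs.foldl (bestStep ft k) (bestStep ft k b x)) with
    | none =>
      rw [hres] at hstep
      obtain ⟨hb0, hall⟩ := hstep
      -- bestStep b x = none forces b = none and ¬P x
      cases b with
      | none =>
        by_cases hp : spentAt ft x ≤ k
        · simp [bestStep, hp] at hb0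
        · refine ⟨rfl, ?_⟩
          intro t ht
          rcases List.mem_cons.mp ht with rfl | ht
          · exact hp
          · exact hall t ht
      | some bb =>
        exfalso
        simp only [bestStep] at hb0
        split_ifs at hb0
    | some m =>
      rw [hres] at hstep
      obtain ⟨h1, h2, h3⟩ := hstep
      refine ⟨?_, ?_, ?_⟩
      · -- provenance of m
        rcases h1 with h1 | ⟨hm, hPm⟩
        · -- bestStep b x = some m
          cases b with
          | none =>
            simp only [bestStep] at h1
            split_ifs at h1 with hc
            · refine Or.inr ⟨by simp [← Option.some_inj.mp h1], ?_⟩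
              rw [← Option.some_inj.mp h1]; exact hc
          | some bb =>
            simp only [bestStep] at h1
            split_ifs at h1 with hc
            · exact Or.inr ⟨by simp [← Option.some_inj.mp h1], by rw [← Option.some_inj.mp h1]; exact hc.1⟩
            · exact Or.inl (by rw [Option.some_inj.mp h1])
        · exact Or.inr ⟨List.mem_cons_of_mem x hm, hPm⟩
      · intro t ht hPt
        rcases List.mem_cons.mp ht with rfl | ht
        · -- x ≤ m : bestStep b x dominates x when P x
          cases b with
          | none =>
            have : bestStep ft k none t = some t := by simp [bestStep, hPt]
            exact h3 t this
          | some bb =>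
            by_cases hc : bb < t
            · have : bestStep ft k (some bb) t = some t := by simp [bestStep, hPt, hc]
              exact h3 t this
            · have : bestStep ft k (some bb) t = some bb := by
                simp only [bestStep, if_neg (by tauto : ¬ (spentAt ft t ≤ k ∧ bb < t))]
              have hbb := h3 bb this
              omega
        · exact h2 t ht hPt
      · intro bb hbb
        subst hbb
        -- bestStep (some bb) x is some of something ≥ bb
        by_cases hc : spentAt ft x ≤ k ∧ bb < x
        · have : bestStep ft k (some bb) x = some x := by simp [bestStep, hc]
          have := h3 x this
          omega
        · have : bestStep ft k (some bb) x = some bb := by simp only [bestStep, if_neg hc]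
          exact h3 bb this

theorem lastT_bounds :
    ∀ (l : List (Int × Int)) (o : Int), l.Pairwise (fun a b : Int × Int => a.1 ≤ b.1) →
      (∀ x ∈ l, o ≤ x.1) → o ≤ lastT l o ∧ ∀ x ∈ l, x.1 ≤ lastT l o := by
  intro l
  induction l with
  | nil => intro o _ _; simp [lastT]
  | cons y ys ih =>
    intro o hpw ho
    rcases List.pairwise_cons.mp hpw with ⟨hy, hys⟩
    obtain ⟨h1, h2⟩ := ih y.1 hys hy
    rw [lastT_cons]
    refine ⟨le_trans (ho y List.mem_cons_self) h1, ?_⟩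
    intro x hx
    rcases List.mem_cons.mp hx with rfl | hx
    · exact h1
    · exact h2 x hx

theorem lastT_mem (l : List (Int × Int)) (o : Int) (h : l ≠ []) :
    ∃ x ∈ l, lastT l o = x.1 := by
  refine ⟨l.getLast h, List.getLast_mem h, ?_⟩
  unfold lastT
  rw [List.getLast?_eq_some_getLast h]

theorem filterMap_if {α β : Type} (c : α → Prop) [DecidablePred c] (f : α → β) :
    ∀ l : List α, l.filterMap (fun p => if c p then some (f p) else none) =
      (l.filter (fun p => decide (c p))).map f := by
  intro l
  induction l with
  | nil => rfl
  | cons x xs ih =>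
    by_cases hc : c x
    · simp [hc, ih]
    · simp [hc, ih]

theorem mapped_len (ft : List Int) : (mappedOf ft).length = ft.length := by
  simp [mappedOf, PySem.List.length_enumerate]

theorem mapped_fst (ft : List Int) : (mappedOf ft).map Prod.fst = ft := by
  simp only [mappedOf, List.map_map]
  exact PySem.List.map_snd_enumerate ft 0

theorem heap_fst_perm (ft : List Int) : ((heapOf ft).map Prod.fst).Perm ft := by
  have := (heap_perm ft).map Prod.fst
  rwa [mapped_fst] at this

theorem mapped_pairwise (ft : List Int) :
    (mappedOf ft).Pairwise (fun a b : Int × Int => a.2 < b.2) := by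
  unfold mappedOf
  exact (PySem.List.pairwise_lt_enumerate ft 0).map _ (fun a b hab => by simpa using hab)

theorem sorted_of_perm_mapped (ft : List Int) (l : List (Int × Int))
    (h : l.Perm (mappedOf ft)) :
    PySem.List.sorted l (fun x => x.2) = mappedOf ft :=
  PySem.List.sorted_eq_of_perm_of_pairwise_lt l (mappedOf ft) (fun x => x.2) h.symm
    (mapped_pairwise ft)

theorem lastT_ub (l : List (Int × Int)) (o : Int)
    (hpw : l.Pairwise (fun a b : Int × Int => a.1 ≤ b.1)) :
    ∀ x ∈ l, x.1 ≤ lastT l o := by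
  cases l with
  | nil => simp
  | cons y ys =>
    rcases List.pairwise_cons.mp hpw with ⟨hy, hys⟩
    obtain ⟨h1, h2⟩ := lastT_bounds ys y.1 hys hy
    rw [lastT_cons]
    intro x hx
    rcases List.mem_cons.mp hx with rfl | hx
    · exact h1
    · exact h2 x hx

theorem val_none (ft : List Int) (k : Int) (hne : ft ≠ []) :
    (PySem.List.pyGetD (PySem.List.sorted (heapOf ft) (fun x => x.2))
        (PySem.Int.mod (k - 0) (ft.length : Int)) (0, 0)).2 =
      PySem.List.pyGetD (PySem.List.pyRange 1 ((ft.length : Int) + 1) 1)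
        (PySem.Int.mod (k - 0)
          (((PySem.List.pyRange 1 ((ft.length : Int) + 1) 1).length : Int))) 0 := by
  have hn : 0 < ft.length := List.length_pos_iff.mpr hne
  have hlenr : (PySem.List.pyRange 1 ((ft.length : Int) + 1) 1).length = ft.length := by
    rw [PySem.List.length_pyRange_one]
    omega
  set i := PySem.Int.mod (k - 0) (ft.length : Int) with hi
  have hi0 : 0 ≤ i := PySem.Int.mod_nonneg _ (by exact_mod_cast hn)
  have hilt : i < (ft.length : Int) := PySem.Int.mod_lt _ (by exact_mod_cast hn)
  rw [sorted_of_perm_mapped ft _ (heap_perm ft), hlenr]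
  rw [PySem.List.pyGetD_eq_getElem _ _ hi0 (by rw [mapped_len]; exact hilt),
    PySem.List.pyGetD_eq_getElem _ _ hi0 (by rw [hlenr]; exact hilt)]
  rw [PySem.List.getElem_pyRange_one]
  unfold mappedOf
  rw [List.getElem_map, PySem.List.getElem_enumerate]
  simp
  omega

theorem solution_eq_alt (food_times : List Int) (k : Int)
    (hpre : Pre_solution food_times k) : solution food_times k = solution_alt food_times k := by
  by_cases hS : food_times.sum ≤ k
  · unfold solution solution_alt
    rw [if_pos hS, if_pos hS]
  · have hA : solution food_times k =
        (PySem.List.pyGetD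
          (PySem.List.sorted (solLoopA k 0 0 (food_times.length : Int) (heapOf food_times)).1
            (fun x => x.2))
          (PySem.Int.mod (k - (solLoopA k 0 0 (food_times.length : Int) (heapOf food_times)).2.1)
            (solLoopA k 0 0 (food_times.length : Int) (heapOf food_times)).2.2) (0, 0)).2 := by
      unfold solution heapOf
      rw [if_neg hS]
    have hlen : (heapOf food_times).length = food_times.length :=
      (heap_perm food_times).length_eq.trans (mapped_len food_times)
    have htw := tw_filter food_times k (heapOf food_times) (heap_pairwise food_times)
    have hwr : heapOf food_times =
        (heapOf food_times).filter (Pd food_times k) ++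
        (heapOf food_times).filter (fun x => !(Pd food_times k x)) := by
      rw [← htw.1, ← htw.2, List.takeWhile_append_dropWhile]
    set w := (heapOf food_times).filter (Pd food_times k) with hw_def
    set rem := (heapOf food_times).filter (fun x => !(Pd food_times k x)) with hrem_def
    have hlen_sum : (heapOf food_times).length = w.length + rem.length := by
      rw [hwr]; exact List.length_append
    have hwpw : w.Pairwise (fun a b : Int × Int => a.1 ≤ b.1) :=
      (heap_pairwise food_times).filter _
    have hmemft : ∀ x ∈ heapOf food_times, x.1 ∈ food_times := by
      intro x hx
      exact ((heap_fst_perm food_times).mem_iff).mp (List.mem_map_of_mem hx)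
    by_cases hk : 0 ≤ k
    · -- the loop runs; it pops exactly the foods with spentAt ≤ k
      have hchar := loopA_char food_times k (heapOf food_times) (heap_pairwise food_times)
        (heap_fst_perm food_times) (heapOf food_times) [] 0 0 (by simp) (by simp [sumF]) hk
      rw [htw.1, htw.2] at hchar
      have hne : food_times ≠ [] := by
        intro h
        rw [h] at hS
        simp at hS
        omega
      rw [show (food_times.length : Int) = ((heapOf food_times).length : Int) by rw [hlen]] at hA
      rw [hchar] at hA
      cases hbest : food_times.foldl (bestStep food_times k) none with
      | none =>
        have hnone := bestFold_char food_times k food_times none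
        rw [hbest] at hnone
        obtain ⟨-, hnoP⟩ := hnone
        have hwnil : w = [] := by
          rw [hw_def, List.filter_eq_nil_iff]
          intro x hx
          simp only [Pd, decide_eq_true_eq]
          exact hnoP x.1 (hmemft x hx)
        have hremall : rem = heapOf food_times := by
          rw [hrem_def, List.filter_eq_self]
          intro x hx
          simp only [Bool.not_eq_eq_eq_not, Bool.not_true, Pd, decide_eq_false_iff_not]
          exact hnoP x.1 (hmemft x hx)
        rw [hwnil] at hA
        rw [hremall] at hA
        have hB : solution_alt food_times k =
            PySem.List.pyGetD (PySem.List.pyRange 1 ((food_times.length : Int) + 1) 1)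
              (PySem.Int.mod (k - 0)
                (((PySem.List.pyRange 1 ((food_times.length : Int) + 1) 1).length : Int))) 0 := by
          unfold solution_alt
          rw [if_neg hS, hbest]
        rw [hA, hB]
        have e1 : sumF ([] : List (Int × Int)) + sumF ([] : List (Int × Int)) +
            lastT ([] : List (Int × Int)) 0 * (((heapOf food_times).length : Int) - (([] : List (Int × Int)).length : Int)) = 0 := by
          simp [sumF, lastT]
        rw [e1]
        have e2 : ((heapOf food_times).length : Int) - (([] : List (Int × Int)).length : Int) = (food_times.length : Int) := by
          simp [hlen]
        rw [e2]
        exact val_none food_times k hne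
      | some b =>
        have hsome := bestFold_char food_times k food_times none
        rw [hbest] at hsome
        obtain ⟨h1, h2, -⟩ := hsome
        have hbmem : b ∈ food_times := by
          rcases h1 with h1 | ⟨hm, -⟩
          · exact absurd h1 (by simp)
          · exact hm
        have hbP : spentAt food_times b ≤ k := by
          rcases h1 with h1 | ⟨-, hP⟩
          · exact absurd h1 (by simp)
          · exact hP
        have hPiff : ∀ t ∈ food_times, (spentAt food_times t ≤ k ↔ t ≤ b) := by
          intro t ht
          exact ⟨h2 t ht, fun h => le_trans (spent_mono food_times h) hbP⟩
        have hw_mem : ∀ x ∈ w, x.1 ≤ b := by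
          intro x hx
          have hxh : x ∈ heapOf food_times := List.mem_of_mem_filter hx
          have hxP : spentAt food_times x.1 ≤ k := by
            have := List.of_mem_filter hx
            simpa [Pd] using this
          exact (hPiff x.1 (hmemft x hxh)).mp hxP
        have hrem_mem : ∀ x ∈ rem, b < x.1 := by
          intro x hx
          have hxh : x ∈ heapOf food_times := List.mem_of_mem_filter hx
          have hxnP : ¬ spentAt food_times x.1 ≤ k := by
            have := List.of_mem_filter hx
            simpa [Pd] using this
          by_contra hle
          exact hxnP ((hPiff x.1 (hmemft x hxh)).mpr (by omega))
        have hwne : w ≠ [] := by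
          have hbheap : b ∈ (heapOf food_times).map Prod.fst :=
            ((heap_fst_perm food_times).mem_iff).mpr hbmem
          obtain ⟨x, hxh, hxb⟩ := List.mem_map.mp hbheap
          have hxw : x ∈ w := by
            rw [hw_def, List.mem_filter]
            exact ⟨hxh, by simp [Pd, hxb, hbP]⟩
          intro h
          rw [h] at hxw
          simp at hxw
        have hlastT : lastT w 0 = b := by
          obtain ⟨x, hxw, hxeq⟩ := lastT_mem w 0 hwne
          have hub : lastT w 0 ≤ b := by rw [hxeq]; exact hw_mem x hxw
          have hbheap : b ∈ (heapOf food_times).map Prod.fst :=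
            ((heap_fst_perm food_times).mem_iff).mpr hbmem
          obtain ⟨y, hyh, hyb⟩ := List.mem_map.mp hbheap
          have hyw : y ∈ w := by
            rw [hw_def, List.mem_filter]
            exact ⟨hyh, by simp [Pd, hyb, hbP]⟩
          have hlb : b ≤ lastT w 0 := by
            rw [← hyb]
            exact lastT_ub w 0 hwpw y hyw
          omega
        have hspent : spentAt food_times b = sumF w + b * rem.length :=
          spent_parts food_times b w rem (by rw [← hwr]; exact heap_fst_perm food_times)
            hw_mem (fun x hx => le_of_lt (hrem_mem x hx))
        have hremne : rem ≠ [] := by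
          intro hremnil
          have hallw : heapOf food_times = w := by rw [hwr, hremnil, List.append_nil]
          have hallle : ∀ t ∈ food_times, t ≤ b := by
            intro t ht
            obtain ⟨x, hxh, hxt⟩ := List.mem_map.mp (((heap_fst_perm food_times).mem_iff).mpr ht)
            rw [← hxt]
            exact hw_mem x (hallw ▸ hxh)
          have : spentAt food_times b = food_times.sum := by
            unfold spentAt
            rw [List.map_congr_left (fun t ht => min_eq_left (hallle t ht))]
            simp
          omega
        -- A's loop state
        have hlenInt : ((heapOf food_times).length : Int) - (w.length : Int) = (rem.length : Int) := by
          rw [hlen_sum]; push_cast; ring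
        rw [hlenInt, hlastT] at hA
        have hkt : sumF ([] : List (Int × Int)) + sumF w + b * (rem.length : Int) =
            spentAt food_times b := by
          rw [hspent]; simp [sumF]
        rw [hkt] at hA
        -- B's branch
        have hB : solution_alt food_times k =
            PySem.List.pyGetD
              ((PySem.List.enumerate food_times).filterMap
                (fun p => if b < p.2 then some (p.1 + 1) else none))
              (PySem.Int.mod (k - spentAt food_times b)
                ((((PySem.List.enumerate food_times).filterMap
                  (fun p => if b < p.2 then some (p.1 + 1) else none)).length : Int))) 0 := by
          unfold solution_alt
          rw [if_neg hS, hbest]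
        rw [hA, hB, filterMap_if (fun p : Int × Int => b < p.2) (fun p : Int × Int => p.1 + 1)]
        set filtered := (PySem.List.enumerate food_times).filter (fun p => decide (b < p.2)) with hf_def
        -- A's remaining pairs, sorted back by index, are exactly the filtered enumerate pairs
        have hpairs_perm : (filtered.map (fun p : Int × Int => (p.2, p.1 + 1))).Perm rem := by
          have hp1 : rem.Perm ((mappedOf food_times).filter (fun x => !(Pd food_times k x))) :=
            (heap_perm food_times).filter _
          have hp2 : (mappedOf food_times).filter (fun x => !(Pd food_times k x)) =
              filtered.map (fun p : Int × Int => (p.2, p.1 + 1)) := by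
            rw [mappedOf, List.filter_map]
            congr 1
            apply List.filter_congr
            intro p hp
            have hpft : p.2 ∈ food_times := by
              rw [PySem.List.mem_enumerate_iff] at hp
              obtain ⟨j, hj, rfl⟩ := hp
              exact List.getElem_mem hj
            have hiffp : (¬ (spentAt food_times p.2 ≤ k)) ↔ (b < p.2) := by
              have h := hPiff p.2 hpft
              omega
            show (!(Pd food_times k (p.2, p.1 + 1))) = decide (b < p.2)
            simp only [Pd]
            rw [show (!decide (spentAt food_times p.2 ≤ k)) =
              decide (¬ (spentAt food_times p.2 ≤ k)) from decide_not.symm,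
              decide_eq_decide]
            exact hiffp
          exact (hp2 ▸ hp1).symm
        have hpairs_pw : (filtered.map (fun p : Int × Int => (p.2, p.1 + 1))).Pairwise
            (fun a b : Int × Int => a.2 < b.2) := by
          have hsub : filtered.Sublist (PySem.List.enumerate food_times) := List.filter_sublist
          have := (PySem.List.pairwise_lt_enumerate food_times 0).sublist hsub
          exact this.map _ (fun a b hab => by simpa using hab)
        have hsorted : PySem.List.sorted rem (fun x => x.2) =
            filtered.map (fun p : Int × Int => (p.2, p.1 + 1)) :=
          PySem.List.sorted_eq_of_perm_of_pairwise_lt rem _ (fun x => x.2) hpairs_perm hpairs_pw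
        rw [hsorted]
        -- index bookkeeping
        have hlf : (filtered.map (fun p : Int × Int => (p.2, p.1 + 1))).length = rem.length :=
          hpairs_perm.length_eq
        have hlf2 : (filtered.map (fun p : Int × Int => (p.1 + 1))).length = rem.length := by
          simpa using hlf
        have hrempos : 0 < rem.length := List.length_pos_iff.mpr hremne
        set i := PySem.Int.mod (k - spentAt food_times b) (rem.length : Int) with hi_def
        have hi0 : 0 ≤ i := PySem.Int.mod_nonneg _ (by exact_mod_cast hrempos)
        have hilt : i < (rem.length : Int) := PySem.Int.mod_lt _ (by exact_mod_cast hrempos)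
        rw [show ((filtered.map (fun p : Int × Int => (p.1 + 1))).length : Int) = (rem.length : Int) by rw [hlf2]]
        rw [PySem.List.pyGetD_eq_getElem _ _ hi0 (by rw [hlf]; exact hilt),
          PySem.List.pyGetD_eq_getElem _ _ hi0 (by rw [hlf2]; exact hilt)]
        rw [List.getElem_map, List.getElem_map]
    · -- k < 0 : the loop never starts; Pre_ gives a nonempty list of nonnegative times
      rcases hpre with hk' | ⟨hne, hpos⟩
      · omega
      · have hn : 0 < (heapOf food_times).length := by
          rw [hlen]; exact List.length_pos_iff.mpr hne
        obtain ⟨x, rest, hcons⟩ := List.exists_cons_of_ne_nil (List.ne_nil_of_length_pos hn)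
        have hloop : solLoopA k 0 0 (food_times.length : Int) (heapOf food_times) =
            (heapOf food_times, 0, (food_times.length : Int)) := by
          rw [hcons]
          obtain ⟨t, j⟩ := x
          simp [solLoopA, hk]
        rw [hloop] at hA
        have hbest : food_times.foldl (bestStep food_times k) none = none := by
          cases hb : food_times.foldl (bestStep food_times k) none with
          | none => rfl
          | some m =>
            exfalso
            have hsome := bestFold_char food_times k food_times none
            rw [hb] at hsome
            obtain ⟨h1, -, -⟩ := hsome
            rcases h1 with h1 | ⟨hm, hP⟩
            · exact absurd h1 (by simp)
            · -- spentAt ft m ≥ n * t₀ > k for the minimal time t₀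
              obtain ⟨t0, ht0m, ht0min⟩ : ∃ t0 ∈ food_times, ∀ y ∈ food_times, t0 ≤ y := by
                cases hmin : PySem.List.min? food_times (fun x => x) with
                | none => exact absurd ((PySem.List.min?_eq_none_iff _ _).mp hmin) hne
                | some t0 =>
                  exact ⟨t0, PySem.List.min?_mem hmin, PySem.List.min?_isMin hmin⟩
              have hlb : ((food_times.map (fun _ => t0)).sum : Int) ≤ spentAt food_times m := by
                unfold spentAt
                apply List.sum_le_sum
                intro t ht
                exact le_min (ht0min t ht) (ht0min m hm)
              rw [PySem.List.sum_map_const_int] at hlb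
              have := hpos t0 ht0m
              omega
        have hB : solution_alt food_times k =
            PySem.List.pyGetD (PySem.List.pyRange 1 ((food_times.length : Int) + 1) 1)
              (PySem.Int.mod (k - 0)
                (((PySem.List.pyRange 1 ((food_times.length : Int) + 1) 1).length : Int))) 0 := by
          unfold solution_alt
          rw [if_neg hS, hbest]
        rw [hA, hB]
        exact val_none food_times k hne

-- ===== VERDICT (by name: the statement is the Claim_ definition above) =====
theorem solution_spec : Claim_equal_solution := by
  intro food_times k _ hpre
  unfold Spec_solution
  exact solution_eq_alt food_times k hpre
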